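-- pv_equiv track=rewrite | github.com/wearypossum4770/dark-coding-challenges | medium/can_be_prepared.py | can_be_prepared
-- ===== SOURCE A (Python) =====
-- def can_be_prepared(recipe: str, ingredients: tuple[str, ...]) -> bool:
--     if not recipe or not ingredients:
--         return False
--     outer = []
--     inner = []
--     for piece in recipe:
--         if piece.isalpha():
--             inner.append(piece)
--         elif piece in "|(" and inner:
--             outer.append(all([c in ingredients for c in inner]))
--             inner = []
--     if inner:
--         outer.append(all([c in ingredients for c in inner]))
--     return any(outer)
-- ===== SOURCE B (Python) =====
-- def can_be_prepared(recipe: str, ingredients: tuple[str, ...]) -> bool: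
--     if not recipe or not ingredients:
--         return False
--     ings = set(ingredients)
--     for segment in recipe.replace("(", "|").split("|"):
--         letters = [c for c in segment if c.isalpha()]
--         if letters and all(c in ings for c in letters):
--             return True
--     return False
-- ===== Notes on version B (the rewrite author's own statement) =====
-- stated objective: faster
-- what changed: A's hand-rolled outer/inner state machine with a per-letter linear scan of the ingredients is replaced by splitting the recipe into alternative groups (replace '(' by '|', split on '|') and testing each group's letters against a set built once, with an early return.
import Mathlib
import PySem

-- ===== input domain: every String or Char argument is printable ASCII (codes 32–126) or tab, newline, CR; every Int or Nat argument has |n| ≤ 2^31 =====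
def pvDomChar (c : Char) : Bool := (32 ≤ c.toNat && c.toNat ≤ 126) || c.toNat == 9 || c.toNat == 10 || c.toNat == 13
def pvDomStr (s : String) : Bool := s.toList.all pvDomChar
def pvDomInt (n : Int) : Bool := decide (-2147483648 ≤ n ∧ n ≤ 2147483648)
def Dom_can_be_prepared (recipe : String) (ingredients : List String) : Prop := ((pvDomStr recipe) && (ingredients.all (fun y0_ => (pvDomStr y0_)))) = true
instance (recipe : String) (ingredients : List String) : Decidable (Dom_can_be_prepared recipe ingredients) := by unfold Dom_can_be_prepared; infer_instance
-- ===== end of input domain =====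

-- B replaces A's hand-rolled inner/outer state machine (which rescans the ingredient
-- list for every letter) by splitting the recipe into segments on '|'/'(' (replace +
-- split) and testing each segment's letters against an ingredient set built once,
-- with an early return (objective: faster; measured faster in a timing run).

-- ===== PORT A =====
-- Python `c in ingredients`: the one-character string c tested against each ingredient
def pvMemA (ingredients : List String) (c : Char) : Bool := ingredients.contains (String.ofList [c])

-- the loop body of A: state = (outer, inner)
def pvStepA (ingredients : List String) (st : List Bool × List Char) (piece : Char) : List Bool × List Char :=
  if PySem.Chars.isalpha piece then (st.1, st.2 ++ [piece])
  else if PySem.Chars.isIn [piece] ['|', '('] && !st.2.isEmpty then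
    (st.1 ++ [(st.2.map (pvMemA ingredients)).all id], ([] : List Char))
  else st

def can_be_prepared (recipe : String) (ingredients : List String) : Bool :=
  if recipe.toList.isEmpty || ingredients.isEmpty then false
  else
    let st := recipe.toList.foldl (pvStepA ingredients) ([], [])
    (if !st.2.isEmpty then st.1 ++ [(st.2.map (pvMemA ingredients)).all id] else st.1).any id

-- ===== PORT B =====
def can_be_prepared_alt (recipe : String) (ingredients : List String) : Bool :=
  if recipe.toList.isEmpty || ingredients.isEmpty then false
  else
    let ings : PySem.Set String := PySem.Set.ofList ingredients
    (PySem.Chars.splitOn (PySem.Chars.replace recipe.toList ['('] ['|']) ['|']).any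
      (fun seg =>
        let letters := seg.filter PySem.Chars.isalpha
        !letters.isEmpty && letters.all (fun c => PySem.Set.contains ings (String.ofList [c])))

-- ===== PRECONDITION & SPEC =====
def Spec_can_be_prepared (recipe : String) (ingredients : List String) (out : Bool) : Prop := out = can_be_prepared_alt recipe ingredients
instance (recipe : String) (ingredients : List String) (out : Bool) : Decidable (Spec_can_be_prepared recipe ingredients out) := by unfold Spec_can_be_prepared; infer_instance

-- ===== CLAIM (what is proved, stated in full; the proofs are below) =====
def Claim_equal_can_be_prepared : Prop := ∀ (recipe : String) (ingredients : List String), Dom_can_be_prepared recipe ingredients → Spec_can_be_prepared recipe ingredients (can_be_prepared recipe ingredients)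

-- ===== LEMMAS AND PROOFS =====

-- a group of letters is satisfiable: nonempty and every letter an ingredient
def pvGood (ingredients : List String) (ls : List Char) : Bool :=
  !ls.isEmpty && ls.all (pvMemA ingredients)

-- intermediate recursive reading of A's state machine, accumulated letters `inner`
def pvChk (ingredients : List String) (inner : List Char) : List Char → Bool
  | [] => pvGood ingredients inner
  | c :: rest =>
    if PySem.Chars.isalpha c then pvChk ingredients (inner ++ [c]) rest
    else if c = '|' ∨ c = '(' then pvGood ingredients inner || pvChk ingredients [] rest
    else pvChk ingredients inner rest

def pvSub (c : Char) : Char := if c = '(' then '|' else c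

-- B's per-segment test, with a pending prefix of letters for the first segment
def pvAnyG (ingredients : List String) (pre : List Char) : List (List Char) → Bool
  | [] => pvGood ingredients pre
  | s :: rest => pvGood ingredients (pre ++ s.filter PySem.Chars.isalpha) ||
      rest.any (fun t => pvGood ingredients (t.filter PySem.Chars.isalpha))

lemma pv_isIn_two (c : Char) :
    PySem.Chars.isIn [c] ['|', '('] = decide (c = '|' ∨ c = '(') := by
  by_cases h : c = '|' ∨ c = '('
  · have : PySem.Chars.isIn [c] ['|', '('] = true :=
      (PySem.Chars.isIn_iff_infix _ _).mpr ((List.singleton_infix_iff _ _).mpr (by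
        rcases h with h | h <;> simp [h]))
    simp [this, h]
  · have : PySem.Chars.isIn [c] ['|', '('] = false :=
      (PySem.Chars.isIn_eq_false_iff _ _).mpr (by
        intro hin
        exact h (by simpa using (List.singleton_infix_iff _ _).mp hin))
    simp [this, h]

lemma pv_replace_go (cs : List Char) : ∀ (fuel : Nat) (acc : List Char), cs.length ≤ fuel →
    PySem.Chars.replace.go ['('] ['|'] fuel cs acc = acc.reverse ++ cs.map pvSub := by
  induction cs with
  | nil => intro fuel acc _; cases fuel <;> simp [PySem.Chars.replace.go]
  | cons c t ih =>
    intro fuel acc h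
    cases fuel with
    | zero => simp at h
    | succ n =>
      simp only [PySem.Chars.replace.go]
      by_cases hc : c = '('
      · simp [hc, List.isPrefixOf, ih n _ (by simpa using h), pvSub]
      · have hp : ('(' == c) = false := by simp [Ne.symm hc]
        simp [List.isPrefixOf, hp, hc, ih n _ (by simpa using h), pvSub]

lemma pv_replace_single (cs : List Char) :
    PySem.Chars.replace cs ['('] ['|'] = cs.map pvSub := by
  simp [PySem.Chars.replace, pv_replace_go cs cs.length [] le_rfl]

lemma pv_splitOn_go (cs : List Char) : ∀ (fuel : Nat) (cur : List Char) (acc : List (List Char)),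
    cs.length ≤ fuel →
    PySem.Chars.splitOn.go ['|'] fuel cs cur acc =
      acc.reverse ++ (List.splitOnP (· == '|') cs).modifyHead (cur.reverse ++ ·) := by
  induction cs with
  | nil => intro fuel cur acc _; cases fuel <;> simp [PySem.Chars.splitOn.go, List.splitOnP_nil]
  | cons c t ih =>
    intro fuel cur acc h
    cases fuel with
    | zero => simp at h
    | succ n =>
      simp only [PySem.Chars.splitOn.go]
      rw [List.splitOnP_cons]
      by_cases hc : c = '|'
      · subst hc
        simp only [List.isPrefixOf, BEq.rfl, Bool.true_and, if_pos, List.length_cons, List.drop_succ_cons]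
        rw [show List.drop ([] : List Char).length t = t from rfl, ih n [] _ (by simpa using h)]
        cases List.splitOnP (fun x => x == '|') t <;> simp
      · have hp : ('|' == c) = false := by simp [Ne.symm hc]
        have hp2 : (c == '|') = false := by simp [hc]
        simp only [List.isPrefixOf, hp, Bool.and_true, if_neg,
          Bool.false_eq_true, not_false_iff, hp2]
        rw [ih n (c :: cur) _ (by simpa using h)]
        obtain ⟨s, S, hS⟩ := List.exists_cons_of_ne_nil (List.splitOnP_ne_nil (· == '|') t)
        simp [hS]

lemma pv_splitOn_single (cs : List Char) :
    PySem.Chars.splitOn cs ['|'] = List.splitOnP (· == '|') cs := by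
  rw [PySem.Chars.splitOn, pv_splitOn_go cs (cs.length+1) [] [] (by omega)]
  obtain ⟨s, S, hS⟩ := List.exists_cons_of_ne_nil (List.splitOnP_ne_nil (· == '|') cs)
  simp [hS]

lemma pv_anyG_nil (ings : List String) (S : List (List Char)) (h : S ≠ []) :
    pvAnyG ings [] S = S.any (fun t => pvGood ings (t.filter PySem.Chars.isalpha)) := by
  obtain ⟨s, T, rfl⟩ := List.exists_cons_of_ne_nil h
  simp [pvAnyG]

lemma pv_chk_eq_anyG (ings : List String) (cs : List Char) : ∀ inner,
    pvChk ings inner cs = pvAnyG ings inner (List.splitOnP (· == '|') (cs.map pvSub)) := by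
  induction cs with
  | nil => intro inner; simp [pvChk, List.splitOnP_nil, pvAnyG]
  | cons c rest ih =>
    intro inner
    simp only [List.map_cons, List.splitOnP_cons]
    by_cases hd : c = '|' ∨ c = '('
    · have hsub : pvSub c = '|' := by rcases hd with h | h <;> simp [pvSub, h]
      have halpha : PySem.Chars.isalpha c = false := by
        rcases hd with h | h <;> subst h <;> decide
      rw [pvChk]
      simp only [halpha, Bool.false_eq_true, if_false, hd, if_pos, hsub, BEq.rfl]
      rw [ih [], pv_anyG_nil _ _ (List.splitOnP_ne_nil _ _)]
      simp [pvAnyG]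
    · rw [not_or] at hd
      have hsub : pvSub c = c := by simp [pvSub, hd.2]
      have hp : (pvSub c == '|') = false := by simp [hsub, hd.1]
      simp only [hp, Bool.false_eq_true, if_false]
      obtain ⟨s, T, hS⟩ := List.exists_cons_of_ne_nil
        (List.splitOnP_ne_nil (· == '|') (rest.map pvSub))
      rw [hS, List.modifyHead_cons]
      by_cases ha : PySem.Chars.isalpha c
      · rw [pvChk]
        simp only [ha, if_pos, ih (inner ++ [c]), hS]
        simp [pvAnyG, hsub, ha, List.append_assoc]
      · rw [pvChk]
        have : ¬(c = '|' ∨ c = '(') := by tauto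
        simp only [ha, Bool.false_eq_true, if_false, this, ih inner, hS]
        simp [pvAnyG, hsub, ha]

lemma pv_fold_eq_chk (ings : List String) (cs : List Char) : ∀ (outer : List Bool) (inner : List Char),
    (let st := cs.foldl (pvStepA ings) (outer, inner);
     (if !st.2.isEmpty then st.1 ++ [(st.2.map (pvMemA ings)).all id] else st.1).any id)
    = (outer.any id || pvChk ings inner cs) := by
  induction cs with
  | nil =>
    intro outer inner
    cases inner <;> simp [pvChk, pvGood, List.all_map]
  | cons c rest ih =>
    intro outer inner
    simp only [List.foldl_cons]
    rw [pvChk]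
    by_cases ha : PySem.Chars.isalpha c
    · simp only [pvStepA, ha, if_pos]
      exact ih outer (inner ++ [c])
    · simp only [pvStepA, ha, Bool.false_eq_true, if_false, pv_isIn_two]
      by_cases hd : c = '|' ∨ c = '('
      · simp only [hd, decide_true, Bool.true_and, if_pos]
        cases inner with
        | nil =>
          simp only [List.isEmpty_nil, Bool.not_true, Bool.false_eq_true, if_false]
          rw [ih outer []]
          simp [pvGood]
        | cons i it =>
          simp only [List.isEmpty_cons, Bool.not_false, if_pos]
          rw [ih (outer ++ [((i :: it).map (pvMemA ings)).all id]) []]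
          simp [pvGood, List.all_map, Bool.or_assoc]
      · simp only [hd, decide_false, Bool.false_and, Bool.false_eq_true, if_false]
        exact ih outer inner

-- ===== VERDICT (by name: the statement is the Claim_ definition above) =====
theorem can_be_prepared_spec : Claim_equal_can_be_prepared := by
  intro recipe ingredients _
  unfold Spec_can_be_prepared can_be_prepared can_be_prepared_alt
  by_cases hg : recipe.toList.isEmpty || ingredients.isEmpty
  · simp [hg]
  · simp only [hg]
    rw [pv_replace_single, pv_splitOn_single]
    have hA := pv_fold_eq_chk ingredients recipe.toList [] []
    simp only at hA
    rw [hA]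
    rw [pv_chk_eq_anyG]
    rw [pv_anyG_nil _ _ (List.splitOnP_ne_nil _ _)]
    simp [pvGood, pvMemA]
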